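-- pv_equiv track=rewrite | github.com/andresuriza/proyecto2-arqui | Compilador.py | uInstruction
-- ===== SOURCE A (Python) =====
-- def uInstruction(opcode, code, cleanCode):
--     if opcode == '1000':
--         rd = str(format(int(code[1][1:]),'04b'))
--         imm = str(format(int(code[2][1:]),'024b'))
--         instBin = imm + rd + opcode
--         return instBin
--     else:
--         rd = str(format(int(code[1][1:]),'04b'))
--         label = code[2]
--         lines = [line.strip() for line in cleanCode.splitlines()]
--         labels = [line for line in lines if line.endswith(':')]
--
--         label_index = 0
--         for index, line in enumerate(labels):
--             if line == label + ":":
--                 label_index = index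
--                 break
--         for index, line in enumerate(lines):
--             if line == label + ":":
--
--                 if label_index == 0:
--                     imm = str(format(index,'024b'))
--                 else:
--                     imm = str(format(index-label_index,'024b'))
--
--                 instBin = imm + rd + opcode
--                 return instBin
-- ===== SOURCE B (Python) =====
-- def uInstruction(opcode, code, cleanCode):
--     rd = format(int(code[1][1:]), '04b')
--     if opcode == '1000':
--         imm = format(int(code[2][1:]), '024b')
--         return imm + rd + opcode
--     target = code[2] + ":"
--     seen_labels = 0
--     for index, raw in enumerate(cleanCode.splitlines()):
--         line = raw.strip()
--         if line == target:
--             return format(index - seen_labels, '024b') + rd + opcode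
--         if line.endswith(':'):
--             seen_labels += 1
--     return None
-- ===== Notes on version B (the rewrite author's own statement) =====
-- stated objective: simpler
-- what changed: A builds a stripped-lines list plus a filtered labels list and runs two sequential index scans (first match among label-lines, then first match among all lines); B makes a single pass over the raw lines, stripping each as it goes and carrying a seen-labels counter, returning format(index - counter) at the first match.
import Mathlib
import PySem

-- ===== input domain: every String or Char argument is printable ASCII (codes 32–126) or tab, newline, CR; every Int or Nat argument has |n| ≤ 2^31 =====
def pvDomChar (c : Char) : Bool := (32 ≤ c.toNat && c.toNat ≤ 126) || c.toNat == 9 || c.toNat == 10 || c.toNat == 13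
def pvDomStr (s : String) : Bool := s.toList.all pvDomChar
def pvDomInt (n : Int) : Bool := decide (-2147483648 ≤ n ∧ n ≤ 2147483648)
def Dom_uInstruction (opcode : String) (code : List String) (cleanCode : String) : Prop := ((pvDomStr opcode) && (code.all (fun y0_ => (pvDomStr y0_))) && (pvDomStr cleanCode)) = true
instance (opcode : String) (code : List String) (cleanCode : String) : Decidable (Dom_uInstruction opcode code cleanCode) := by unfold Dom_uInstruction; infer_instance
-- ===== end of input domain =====

-- B fuses A's two scans (first-index among label-lines, then first-index among all lines) into a
-- single pass over the raw lines carrying a seen-labels counter; simpler, same return value.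

-- format(n, '0{w}b'): binary digits of n zero-padded to width w (sign first for negative n).
def pyFmtB (n : Int) (w : Nat) : List Char :=
  match PySem.Int.toBinChars n with
  | '-' :: ds => '-' :: (List.replicate (w - 1 - ds.length) '0' ++ ds)
  | ds => List.replicate (w - ds.length) '0' ++ ds

-- ===== PORT A =====
-- A's first loop: enumerate(labels) with break; label_index stays 0 when the label is absent.
def uInstA_first (t : String) : List String → Int → Int
  | [], _ => 0
  | l :: rest, i => if l = t then i else uInstA_first t rest (i + 1)

-- A's second loop over all stripped lines, with A's 'label_index == 0' branch kept verbatim.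
def uInstA_second (op : String) (rd : List Char) (t : String) (li : Int) : List String → Int → Option String
  | [], _ => none
  | l :: rest, i =>
    if l = t then
      some (String.ofList ((if li = 0 then pyFmtB i 24 else pyFmtB (i - li) 24) ++ rd ++ op.toList))
    else uInstA_second op rd t li rest (i + 1)

def uInstruction (opcode : String) (code : List String) (cleanCode : String) : Option String :=
  if opcode = "1000" then
    match PySem.List.pyGet? code 1 with
    | none => none
    | some c1 =>
      match PySem.Int.ofChars? c1.toList.tail with
      | none => none
      | some rdv =>
        match PySem.List.pyGet? code 2 with
        | none => none
        | some c2 =>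
          match PySem.Int.ofChars? c2.toList.tail with
          | none => none
          | some immv => some (String.ofList (pyFmtB immv 24 ++ pyFmtB rdv 4 ++ opcode.toList))
  else
    match PySem.List.pyGet? code 1 with
    | none => none
    | some c1 =>
      match PySem.Int.ofChars? c1.toList.tail with
      | none => none
      | some rdv =>
        match PySem.List.pyGet? code 2 with
        | none => none
        | some label =>
          let lines := (PySem.Str.splitlines cleanCode).map PySem.Str.strip
          let labels := lines.filter (fun l => PySem.Str.endswith l ":")
          let t := String.ofList (label.toList ++ [':'])
          uInstA_second opcode (pyFmtB rdv 4) t (uInstA_first t labels 0) lines 0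

-- ===== PORT B =====
-- B's single loop: strip each raw line as it passes, counting label-lines seen so far.
def uInstB_go (op : String) (rd : List Char) (t : String) : List String → Int → Int → Option String
  | [], _, _ => none
  | raw :: rest, idx, cnt =>
    let line := PySem.Str.strip raw
    if line = t then some (String.ofList (pyFmtB (idx - cnt) 24 ++ rd ++ op.toList))
    else uInstB_go op rd t rest (idx + 1) (cnt + (if PySem.Str.endswith line ":" then 1 else 0))

def uInstruction_alt (opcode : String) (code : List String) (cleanCode : String) : Option String :=
  match PySem.List.pyGet? code 1 with
  | none => none
  | some c1 =>
    match PySem.Int.ofChars? c1.toList.tail with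
    | none => none
    | some rdv =>
      let rd := pyFmtB rdv 4
      if opcode = "1000" then
        match PySem.List.pyGet? code 2 with
        | none => none
        | some c2 =>
          match PySem.Int.ofChars? c2.toList.tail with
          | none => none
          | some immv => some (String.ofList (pyFmtB immv 24 ++ rd ++ opcode.toList))
      else
        match PySem.List.pyGet? code 2 with
        | none => none
        | some label =>
          uInstB_go opcode rd (String.ofList (label.toList ++ [':'])) (PySem.Str.splitlines cleanCode) 0 0

-- ===== PRECONDITION & SPEC =====
-- Pre_ excludes exactly the inputs where Python A raises: code shorter than 3 (IndexError),
-- int(code[1][1:]) failing (ValueError), and — on the '1000' branch — int(code[2][1:]) failing.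
def Pre_uInstruction (opcode : String) (code : List String) (cleanCode : String) : Prop :=
  2 < code.length ∧
  (PySem.Int.ofStr? (String.ofList ((code.getD 1 "").toList.drop 1))).isSome = true ∧
  (opcode = "1000" → (PySem.Int.ofStr? (String.ofList ((code.getD 2 "").toList.drop 1))).isSome = true)
instance (opcode : String) (code : List String) (cleanCode : String) : Decidable (Pre_uInstruction opcode code cleanCode) := by unfold Pre_uInstruction; infer_instance

def pvWitness_uInstruction : String × List String × String :=
  ("0100", ["J", "x3", "loop"], "start:\n add x1\nloop:\n sub")

def Spec_uInstruction (opcode : String) (code : List String) (cleanCode : String) (out : Option String) : Prop := out = uInstruction_alt opcode code cleanCode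
instance (opcode : String) (code : List String) (cleanCode : String) (out : Option String) : Decidable (Spec_uInstruction opcode code cleanCode out) := by unfold Spec_uInstruction; infer_instance

-- ===== CLAIM (what is proved, stated in full; the proofs are below) =====
def Claim_equal_uInstruction : Prop := ∀ (opcode : String) (code : List String) (cleanCode : String), Dom_uInstruction opcode code cleanCode → Pre_uInstruction opcode code cleanCode → Spec_uInstruction opcode code cleanCode (uInstruction opcode code cleanCode)

-- ===== LEMMAS AND PROOFS =====

-- A's target 'label + ":"' always ends with ':'.
lemma endswith_colon (l : List Char) : PySem.Str.endswith (String.ofList (l ++ [':'])) ":" = true := by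
  simp [PySem.Chars.endswith_iff]

lemma second_none (op : String) (rd : List Char) (t : String) (li : Int) :
    ∀ (L : List String) (i : Int), t ∉ L → uInstA_second op rd t li L i = none := by
  intro L
  induction L with
  | nil => intro i _; rfl
  | cons l rest ih =>
    intro i h
    simp only [List.mem_cons, not_or] at h
    simp [uInstA_second, Ne.symm h.1, ih _ h.2]

lemma first_found (t : String) :
    ∀ (L : List String) (i : Int), t ∈ L → uInstA_first t L i = i + (L.idxOf t : Int) := by
  intro L
  induction L with
  | nil => intro i h; cases h
  | cons l rest ih =>
    intro i h
    by_cases he : l = t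
    · simp [uInstA_first, he, List.idxOf_cons_self]
    · have ht : t ∈ rest := by
        rcases List.mem_cons.mp h with h' | h'
        · exact absurd h'.symm he
        · exact h'
      rw [uInstA_first, if_neg he, ih _ ht, List.idxOf_cons_ne _ he]
      push_cast
      ring

-- One pass with a counter equals A's second scan fed the first-scan index (as idxOf on the filter).
lemma key (op : String) (rd : List Char) (t : String) (ht : PySem.Str.endswith t ":" = true) :
    ∀ (raws : List String) (idx cnt : Int),
      uInstB_go op rd t raws idx cnt =
        uInstA_second op rd t
          (cnt + (((raws.map PySem.Str.strip).filter (fun l => PySem.Str.endswith l ":")).idxOf t : Int))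
          (raws.map PySem.Str.strip) idx := by
  intro raws
  induction raws with
  | nil => intro idx cnt; rfl
  | cons raw rest ih =>
    intro idx cnt
    by_cases he : PySem.Str.strip raw = t
    · simp only [uInstB_go, uInstA_second, List.map_cons, he, List.filter_cons, ht, if_true,
        List.idxOf_cons_self, Nat.cast_zero, add_zero]
      by_cases hc : cnt = 0
      · simp [hc]
      · rw [if_neg hc]
    · by_cases hl : PySem.Str.endswith (PySem.Str.strip raw) ":" = true
      · simp only [uInstB_go, uInstA_second, List.map_cons, if_neg he, hl, if_true,
          List.filter_cons_of_pos, List.idxOf_cons_ne _ (fun h => he h), ih]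
        push_cast
        ring_nf
      · simp only [uInstB_go, uInstA_second, List.map_cons, if_neg he, hl, ih]
        have hl' : PySem.Chars.endswith (PySem.Chars.strip raw.toList) [':'] = false := by
          simpa [PySem.Str.endswith, PySem.Str.strip, Bool.not_eq_true] using hl
        simp [hl']

-- ===== VERDICT (by name: the statement is the Claim_ definition above) =====
theorem uInstruction_spec : Claim_equal_uInstruction := by
  intro opcode code cleanCode _ _
  unfold Spec_uInstruction uInstruction uInstruction_alt
  by_cases hop : opcode = "1000"
  · rw [if_pos hop]
    cases h1 : PySem.List.pyGet? code 1 with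
    | none => simp
    | some c1 =>
      cases h2 : PySem.Int.ofChars? c1.toList.tail with
      | none => simp [h2]
      | some rdv =>
        cases h3 : PySem.List.pyGet? code 2 with
        | none => simp [h2, hop]
        | some c2 =>
          cases h4 : PySem.Int.ofChars? c2.toList.tail with
          | none => simp [h2, h4, hop]
          | some immv => simp [h2, h4, hop]
  · rw [if_neg hop]
    cases h1 : PySem.List.pyGet? code 1 with
    | none => simp
    | some c1 =>
      cases h2 : PySem.Int.ofChars? c1.toList.tail with
      | none => simp [h2]
      | some rdv =>
        cases h3 : PySem.List.pyGet? code 2 with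
        | none => simp [h2, hop]
        | some label =>
          simp only [h2, if_neg hop]
          have ht : PySem.Str.endswith (String.ofList (label.toList ++ [':'])) ":" = true :=
            endswith_colon _
          rw [key opcode (pyFmtB rdv 4) _ ht _ 0 0]
          by_cases hm : String.ofList (label.toList ++ [':']) ∈
              (((PySem.Str.splitlines cleanCode).map PySem.Str.strip).filter
                (fun l => PySem.Str.endswith l ":"))
          · rw [first_found _ _ 0 hm]
          · have hnl : String.ofList (label.toList ++ [':']) ∉
                ((PySem.Str.splitlines cleanCode).map PySem.Str.strip) :=
              fun h => hm (List.mem_filter.mpr ⟨h, ht⟩)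
            rw [second_none _ _ _ _ _ _ hnl, second_none _ _ _ _ _ _ hnl]
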